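-- pv_equiv track=rewrite | github.com/federicodiazgerstner/sd_excercises_uade | Segundo Parcial Díaz Gerstner.py | buscamenorprod
-- ===== SOURCE A (Python) =====
-- def buscamenorprod(v):
--     menor = v[1]
--     pos = []
--     for i in range(1, len(v)):
--         if v[i] < menor:
--             menor = v[i]
--     for i in range(1, len(v)):
--         if v[i] == menor:
--             pos.append(i)
--
--     return pos
-- ===== SOURCE B (Python) =====
-- def buscamenorprod(v):
--     menor = v[1]
--     pos = []
--     for i in range(1, len(v)):
--         x = v[i]
--         if x < menor:
--             menor = x
--             pos = [i]
--         elif x == menor: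
--             pos.append(i)
--     return pos
-- ===== Notes on version B (the rewrite author's own statement) =====
-- stated objective: alternative
-- what changed: Single pass maintaining the current minimum and its position list simultaneously (resetting the list on a new minimum), instead of A's two separate scans (one to find the minimum, one to collect positions).
import Mathlib
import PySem

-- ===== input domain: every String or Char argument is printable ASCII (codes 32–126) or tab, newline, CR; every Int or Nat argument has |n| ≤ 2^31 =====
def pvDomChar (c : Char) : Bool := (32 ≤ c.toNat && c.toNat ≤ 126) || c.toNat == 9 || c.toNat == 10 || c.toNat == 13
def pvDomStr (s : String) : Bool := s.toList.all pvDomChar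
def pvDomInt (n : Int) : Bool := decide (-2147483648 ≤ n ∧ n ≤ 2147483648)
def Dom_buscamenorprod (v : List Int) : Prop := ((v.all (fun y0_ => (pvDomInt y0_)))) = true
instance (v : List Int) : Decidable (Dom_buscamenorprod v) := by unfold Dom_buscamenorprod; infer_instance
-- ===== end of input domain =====

-- B does one pass maintaining (current minimum, positions) instead of A's two scans; same return values.

-- ===== PORT A =====
-- Two passes over range(1, len(v)): first computes the minimum, second collects positions.
def buscamenorprod (v : List Int) : List Int :=
  let menor := (PySem.List.pyRange 1 (v.length : Int) 1).foldl
      (fun m i => if PySem.List.pyGetD v i 0 < m then PySem.List.pyGetD v i 0 else m)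
      (PySem.List.pyGetD v 1 0)
  (PySem.List.pyRange 1 (v.length : Int) 1).foldl
      (fun pos i => if PySem.List.pyGetD v i 0 == menor then pos ++ [i] else pos) []

-- ===== PORT B =====
-- One pass: state (menor, pos); a strictly smaller element resets pos to [i], an equal one appends i.
def buscamenorprod_alt (v : List Int) : List Int :=
  (( PySem.List.pyRange 1 (v.length : Int) 1).foldl
      (fun (st : Int × List Int) i =>
        let x := PySem.List.pyGetD v i 0
        if x < st.1 then (x, [i])
        else if x == st.1 then (st.1, st.2 ++ [i])
        else st)
      (PySem.List.pyGetD v 1 0, [])).2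

-- ===== PRECONDITION & SPEC =====
-- A (and B) evaluate v[1] first, so both raise IndexError when len(v) < 2; Pre_ excludes exactly those inputs.
def Pre_buscamenorprod (v : List Int) : Prop := 2 ≤ v.length
instance (v : List Int) : Decidable (Pre_buscamenorprod v) := by unfold Pre_buscamenorprod; infer_instance
def pvWitness_buscamenorprod : List Int := [3, 1, 2, 1]

def Spec_buscamenorprod (v : List Int) (out : List Int) : Prop := out = buscamenorprod_alt v
instance (v : List Int) (out : List Int) : Decidable (Spec_buscamenorprod v out) := by unfold Spec_buscamenorprod; infer_instance

-- ===== CLAIM (what is proved, stated in full; the proofs are below) =====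
def Claim_equal_buscamenorprod : Prop := ∀ (v : List Int), Dom_buscamenorprod v → Pre_buscamenorprod v → Spec_buscamenorprod v (buscamenorprod v)

-- ===== LEMMAS AND PROOFS =====

-- A's second loop, over any index list: it appends exactly the indices whose value equals m.
theorem pv_posfold (g : Int → Int) (m : Int) (l : List Int) (acc : List Int) :
    l.foldl (fun pos i => if g i == m then pos ++ [i] else pos) acc
      = acc ++ l.filter (fun i => g i == m) := by
  induction l generalizing acc with
  | nil => simp
  | cons i t ih =>
    rw [List.foldl_cons, List.filter_cons]
    by_cases h : (g i == m) = true
    · rw [if_pos h, if_pos h, ih]; simp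
    · rw [if_neg h, if_neg h, ih]

-- The running minimum never exceeds its start value.
theorem pv_minfold_le (g : Int → Int) (l : List Int) (m0 : Int) :
    l.foldl (fun m i => if g i < m then g i else m) m0 ≤ m0 := by
  induction l generalizing m0 with
  | nil => simp
  | cons i t ih =>
    simp only [List.foldl_cons]
    split_ifs with h
    · exact le_trans (ih (g i)) (le_of_lt h)
    · exact ih m0

-- Invariant of B's single pass: the state is (running minimum M, positions of M in the
-- indices processed so far), where the initial positions p0 survive iff no strictly
-- smaller element reset them (i.e. iff the running minimum never dropped below m0).
theorem pv_key (g : Int → Int) (l : List Int) (m0 : Int) (p0 : List Int) :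
    l.foldl
      (fun (st : Int × List Int) i =>
        let x := g i
        if x < st.1 then (x, [i])
        else if x == st.1 then (st.1, st.2 ++ [i])
        else st)
      (m0, p0)
      = (l.foldl (fun m i => if g i < m then g i else m) m0,
         (if l.foldl (fun m i => if g i < m then g i else m) m0 < m0 then [] else p0)
           ++ l.filter (fun i => g i == l.foldl (fun m i => if g i < m then g i else m) m0)) := by
  induction l generalizing m0 p0 with
  | nil => simp
  | cons i t ih =>
    simp only [List.foldl_cons, List.filter_cons]
    by_cases h1 : g i < m0
    · -- strict drop: state resets to (g i, [i]); running minimum restarts from g i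
      simp only [if_pos h1]
      rw [ih (g i) [i]]
      have hle := pv_minfold_le g t (g i)
      simp only [Prod.mk.injEq, true_and]
      by_cases h2 : t.foldl (fun m i => if g i < m then g i else m) (g i) < g i
      · -- a later element is even smaller: i is not a position of the final minimum
        have hne : (g i == t.foldl (fun m i => if g i < m then g i else m) (g i)) = false := by
          simp; omega
        rw [if_pos h2, if_pos (lt_trans h2 h1), hne]; simp
      · -- the final minimum is g i itself: i is its first position
        have heq : t.foldl (fun m i => if g i < m then g i else m) (g i) = g i :=
          le_antisymm hle (not_lt.mp h2)
        rw [if_neg h2, heq]; simp [h1]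
    · -- no drop at this step: running minimum stays m0 here
      simp only [if_neg h1]
      have hle := pv_minfold_le g t m0
      by_cases h2 : g i = m0
      · -- equal element: i appended to the positions
        rw [if_pos (show (g i == m0) = true by simp [h2]), ih m0 (p0 ++ [i])]
        simp only [Prod.mk.injEq, true_and]
        by_cases h3 : t.foldl (fun m i => if g i < m then g i else m) m0 < m0
        · have hne : (g i == t.foldl (fun m i => if g i < m then g i else m) m0) = false := by
            simp; omega
          simp [h3, hne]
        · have heq : t.foldl (fun m i => if g i < m then g i else m) m0 = m0 :=
            le_antisymm hle (not_lt.mp h3)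
          have hbe : (g i == t.foldl (fun m i => if g i < m then g i else m) m0) = true := by
            simp [heq, h2]
          simp [h3, hbe]
      · -- strictly larger element: ignored, and never a position of the final minimum
        rw [if_neg (show ¬ (g i == m0) = true by simp [h2]), ih m0 p0]
        simp only [Prod.mk.injEq, true_and]
        have hgt : m0 < g i := lt_of_le_of_ne (not_lt.mp h1) (Ne.symm h2)
        have hne : (g i == t.foldl (fun m i => if g i < m then g i else m) m0) = false := by
          simp; omega
        simp [hne]

-- ===== VERDICT (by name: the statement is the Claim_ definition above) =====
theorem buscamenorprod_spec : Claim_equal_buscamenorprod := by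
  intro v _ _
  unfold Spec_buscamenorprod buscamenorprod buscamenorprod_alt
  rw [pv_key (fun i => PySem.List.pyGetD v i 0)]
  rw [pv_posfold (fun i => PySem.List.pyGetD v i 0)]
  split_ifs <;> simp
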